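-- pv_equiv track=rewrite | github.com/khs0415p/Algorithm | 프로그래머스/unrated/152995. 인사고과/인사고과.py | solution
-- ===== SOURCE A (Python) =====
-- def solution(scores):
--
--     pivot = scores[0]
--     total = sum(pivot)
--     scores.sort(key=lambda x:[-x[0], x[1]])
--
--     answer = 1
--     ths = 0
--     for score in scores:
--         if pivot[0] < score[0] and pivot[1] < score[1]:
--             return -1
--
--         if ths <= score[1]:
--             if total < score[0] + score[1]:
--                 answer += 1
--             ths = score[1]
--
--     return answer
-- ===== SOURCE B (Python) =====
-- def solution(scores):
--     pivot = scores[0]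
--     total = sum(pivot)
--     scores.sort(key=lambda x: [-x[0], x[1]])
--
--     def eliminated(x):
--         return any(y[0] > x[0] and y[1] > x[1] for y in scores)
--
--     if eliminated(pivot):
--         return -1
--     return 1 + sum(1 for x in scores if not eliminated(x) and x[0] + x[1] > total)
-- ===== Notes on version B (the rewrite author's own statement) =====
-- stated objective: alternative
-- what changed: A's single sorted pass with a running second-score threshold is replaced by explicit nested dominance scans: an employee is eliminated iff someone strictly beats both scores, and the rank is 1 plus the number of non-eliminated employees with a strictly larger total; B keeps A's in-place sort of the argument.
-- intended difference: On inputs whose pivot is undominated but which contain an undominated employee with a negative second score and a total strictly above the pivot's, A's threshold starts at 0 instead of -infinity and silently skips that employee, returning a smaller count; B counts every undominated employee with a larger total, which is the intended rank. — e.g. on solution([[0, 0], [2, -1]]): A returns 1, B returns 2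
import Mathlib
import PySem

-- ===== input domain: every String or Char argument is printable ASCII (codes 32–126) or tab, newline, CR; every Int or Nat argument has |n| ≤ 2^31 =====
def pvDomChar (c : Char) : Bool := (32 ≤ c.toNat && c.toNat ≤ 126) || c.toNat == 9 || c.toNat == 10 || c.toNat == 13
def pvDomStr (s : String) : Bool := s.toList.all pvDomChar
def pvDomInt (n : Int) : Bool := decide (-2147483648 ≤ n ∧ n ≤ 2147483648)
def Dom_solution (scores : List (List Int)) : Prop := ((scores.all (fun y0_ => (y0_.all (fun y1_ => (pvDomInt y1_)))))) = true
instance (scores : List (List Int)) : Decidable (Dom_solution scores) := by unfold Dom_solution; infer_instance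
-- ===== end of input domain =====

-- B replaces A's sorted single pass with a running threshold by explicit nested dominance
-- scans (alternative decomposition, same in-place sort side effect on the argument; the
-- equivalence proved here is about the return value).

-- ===== PORT A =====
-- Python's key `[-x[0], x[1]]` compares lexicographically: ported as a Lex (Int × Int) key.
-- x.getD i 0 is exact for x[i] under Pre_solution (every row has length ≥ 2).
def sortKey (x : List Int) : Lex (Int × Int) := toLex (-(x.getD 0 0), x.getD 1 0)

def solutionLoop (p0 p1 total : Int) : List (List Int) → Int → Int → Int
  | [], answer, _ => answer
  | s :: rest, answer, ths =>
    if p0 < s.getD 0 0 ∧ p1 < s.getD 1 0 then -1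
    else if ths ≤ s.getD 1 0 then
      solutionLoop p0 p1 total rest (if total < s.getD 0 0 + s.getD 1 0 then answer + 1 else answer) (s.getD 1 0)
    else
      solutionLoop p0 p1 total rest answer ths

def solution (scores : List (List Int)) : Int :=
  let pivot := scores.headD []
  let total := pivot.sum
  let ss := PySem.List.sorted scores sortKey
  solutionLoop (pivot.getD 0 0) (pivot.getD 1 0) total ss 1 0

-- ===== PORT B =====
def dominatesB (y x : List Int) : Bool :=
  decide (x.getD 0 0 < y.getD 0 0) && decide (x.getD 1 0 < y.getD 1 0)

def eliminatedB (ss : List (List Int)) (x : List Int) : Bool :=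
  ss.any (fun y => dominatesB y x)

def solution_alt (scores : List (List Int)) : Int :=
  let pivot := scores.headD []
  let total := pivot.sum
  let ss := PySem.List.sorted scores sortKey
  if eliminatedB ss pivot then -1
  else 1 + ((ss.filter (fun x => !eliminatedB ss x && decide (total < x.getD 0 0 + x.getD 1 0))).length : Int)

-- ===== PRECONDITION & SPEC =====
-- Pre_ excludes exactly the inputs on which the Python A raises IndexError:
-- an empty list (scores[0]) or a row with fewer than two entries (x[0]/x[1]).
def Pre_solution (scores : List (List Int)) : Prop :=
  scores ≠ [] ∧ ∀ s ∈ scores, 2 ≤ s.length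
instance (scores : List (List Int)) : Decidable (Pre_solution scores) := by
  unfold Pre_solution; infer_instance

def pvWitness_solution : List (List Int) := [[2, 2], [1, 4]]

-- On inputs where the pivot is undominated but some undominated employee has a NEGATIVE
-- second score and a total beating the pivot's, A's threshold starts at 0 instead of -inf
-- and silently skips that employee (returning a smaller count), while B counts every
-- undominated employee with a strictly larger total, which is the intended rank.
-- beats y x: row y strictly exceeds row x on both of the first two scores.
def beats (y x : List Int) : Bool :=
  decide (x.headD 0 < y.headD 0 ∧ x.tail.headD 0 < y.tail.headD 0)
def D_solution : List (List Int) → Prop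
  | [] => False
  | p :: t => ∃ x ∈ p :: t,
      x.tail.headD 0 < 0 ∧ p.sum < x.headD 0 + x.tail.headD 0 ∧ ∀ y ∈ p :: t, !(beats y x || beats y p)
instance (scores : List (List Int)) : Decidable (D_solution scores) := by
  unfold D_solution; cases scores <;> infer_instance

def Spec_solution (scores : List (List Int)) (out : Int) : Prop :=
  ¬ D_solution scores → out = solution_alt scores
instance (scores : List (List Int)) (out : Int) : Decidable (Spec_solution scores out) := by
  unfold Spec_solution; infer_instance

def pvDiffWitness_solution : List (List Int) := [[0, 0], [2, -1]]
def pvDiffWitnessOut_solution : Int × Int := (1, 2)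

-- ===== CLAIM (what is proved, stated in full; the proofs are below) =====
def Claim_unchanged_solution : Prop := ∀ (scores : List (List Int)), Dom_solution scores → Pre_solution scores → Spec_solution scores (solution scores)
def Claim_changed_solution : Prop := Dom_solution (pvDiffWitness_solution) ∧ Pre_solution (pvDiffWitness_solution) ∧ D_solution (pvDiffWitness_solution) ∧ solution (pvDiffWitness_solution) = pvDiffWitnessOut_solution.1 ∧ solution_alt (pvDiffWitness_solution) = pvDiffWitnessOut_solution.2 ∧ pvDiffWitnessOut_solution.1 ≠ pvDiffWitnessOut_solution.2
def Claim_exact_solution : Prop := ∀ (scores : List (List Int)), Dom_solution scores → Pre_solution scores → D_solution scores → solution scores ≠ solution_alt scores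

-- ===== LEMMAS AND PROOFS =====

-- Pure counting core of A's loop (no early return).
def countF (total : Int) : Int → List (List Int) → Nat
  | _, [] => 0
  | ths, s :: r =>
    if ths ≤ s.getD 1 0 then
      (if total < s.getD 0 0 + s.getD 1 0 then 1 else 0) + countF total (s.getD 1 0) r
    else countF total ths r

lemma loop_dominated (p0 p1 total : Int) :
    ∀ (L : List (List Int)) (answer ths : Int),
      (∃ y ∈ L, p0 < y.getD 0 0 ∧ p1 < y.getD 1 0) →
      solutionLoop p0 p1 total L answer ths = -1 := by
  intro L
  induction L with
  | nil => intro _ _ h; simp at h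
  | cons s rest ih =>
    intro answer ths h
    by_cases hs : p0 < s.getD 0 0 ∧ p1 < s.getD 1 0
    · simp only [solutionLoop]; rw [if_pos hs]
    · have : ∃ y ∈ rest, p0 < y.getD 0 0 ∧ p1 < y.getD 1 0 := by
        rcases h with ⟨y, hy, hdy⟩
        rcases List.mem_cons.1 hy with rfl | hy'
        · exact absurd hdy hs
        · exact ⟨y, hy', hdy⟩
      simp only [solutionLoop, if_neg hs]
      split <;> exact ih _ _ this

lemma loop_clean (p0 p1 total : Int) :
    ∀ (L : List (List Int)) (answer ths : Int),
      (∀ y ∈ L, ¬(p0 < y.getD 0 0 ∧ p1 < y.getD 1 0)) →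
      solutionLoop p0 p1 total L answer ths = answer + (countF total ths L : Int) := by
  intro L
  induction L with
  | nil => intro answer ths _; simp [solutionLoop, countF]
  | cons s rest ih =>
    intro answer ths h
    have hs := h s (List.mem_cons_self ..)
    have hr : ∀ y ∈ rest, ¬(p0 < y.getD 0 0 ∧ p1 < y.getD 1 0) :=
      fun y hy => h y (List.mem_cons_of_mem _ hy)
    simp only [solutionLoop, if_neg hs, countF]
    split
    · rw [ih _ _ hr]; split <;> push_cast <;> ring
    · exact ih _ _ hr

lemma countP_lt {α : Type} {p q : α → Bool} :
    ∀ {l : List α}, (∀ a ∈ l, p a = true → q a = true) →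
      ∀ x, x ∈ l → q x = true → p x = false → l.countP p < l.countP q := by
  intro l
  induction l with
  | nil => intro _ x hx; simp at hx
  | cons a t ih =>
    intro h x hx hqx hpx
    have hmono : t.countP p ≤ t.countP q :=
      List.countP_mono_left (fun b hb => h b (List.mem_cons_of_mem _ hb))
    rcases List.mem_cons.1 hx with rfl | hx'
    · rw [List.countP_cons, List.countP_cons, hpx, hqx]
      norm_num
      exact hmono
    · have := ih (fun b hb => h b (List.mem_cons_of_mem _ hb)) x hx' hqx hpx
      have hha : (if p a then 1 else 0) ≤ (if q a then (1:Nat) else 0) := by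
        by_cases hp : p a = true
        · simp [hp, h a (List.mem_cons_self ..) hp]
        · simp [Bool.eq_false_iff.2 hp]
      simp only [List.countP_cons]
      split_ifs at hha ⊢ <;> omega

lemma key_le_iff (x z : List Int) : sortKey x ≤ sortKey z ↔
    z.getD 0 0 < x.getD 0 0 ∨ (x.getD 0 0 = z.getD 0 0 ∧ x.getD 1 0 ≤ z.getD 1 0) := by
  rw [sortKey, sortKey, Prod.Lex.le_iff]
  dsimp
  omega

lemma elimB_eq_decide (L : List (List Int)) (z : List Int) :
    eliminatedB L z = decide (∃ y ∈ L, z.getD 0 0 < y.getD 0 0 ∧ z.getD 1 0 < y.getD 1 0) := by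
  rw [Bool.eq_iff_iff]
  simp [eliminatedB, dominatesB, List.any_eq_true]

lemma pred_eq_decide (L : List (List Int)) (ths total : Int) (z : List Int) :
    ((!(decide (z.getD 1 0 < ths) || eliminatedB L z)) && decide (total < z.getD 0 0 + z.getD 1 0)) =
    decide (¬(z.getD 1 0 < ths ∨ ∃ y ∈ L, z.getD 0 0 < y.getD 0 0 ∧ z.getD 1 0 < y.getD 1 0) ∧
      total < z.getD 0 0 + z.getD 1 0) := by
  rw [Bool.eq_iff_iff, elimB_eq_decide]
  simp [not_or, and_assoc]

lemma countF_eq (total : Int) :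
    ∀ (L : List (List Int)) (ths : Int), 0 ≤ ths →
      L.Pairwise (fun a b => sortKey a ≤ sortKey b) →
      countF total ths L =
        L.countP (fun z => (!(decide (z.getD 1 0 < ths) || eliminatedB L z)) &&
          decide (total < z.getD 0 0 + z.getD 1 0)) := by
  intro L
  induction L with
  | nil => intro ths _ _; simp [countF]
  | cons x r ih =>
    intro ths h0 hp
    rw [List.pairwise_cons] at hp
    obtain ⟨hx, hr⟩ := hp
    have hx' : ∀ z ∈ r, z.getD 0 0 < x.getD 0 0 ∨
        (x.getD 0 0 = z.getD 0 0 ∧ x.getD 1 0 ≤ z.getD 1 0) :=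
      fun z hz => (key_le_iff x z).1 (hx z hz)
    have hEx : ¬ ∃ y ∈ x :: r, x.getD 0 0 < y.getD 0 0 ∧ x.getD 1 0 < y.getD 1 0 := by
      rintro ⟨y, hy, hd⟩
      rcases List.mem_cons.1 hy with rfl | hy'
      · omega
      · rcases hx' y hy' with h | h <;> omega
    rw [List.countP_cons]
    by_cases hk : ths ≤ x.getD 1 0
    · simp only [countF, if_pos hk]
      rw [ih (x.getD 1 0) (le_trans h0 hk) hr]
      have hcong : r.countP (fun z => (!(decide (z.getD 1 0 < x.getD 1 0) || eliminatedB r z)) &&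
            decide (total < z.getD 0 0 + z.getD 1 0)) =
          r.countP (fun z => (!(decide (z.getD 1 0 < ths) || eliminatedB (x :: r) z)) &&
            decide (total < z.getD 0 0 + z.getD 1 0)) := by
        apply List.countP_congr
        intro z hz
        rw [pred_eq_decide, pred_eq_decide, decide_eq_true_iff, decide_eq_true_iff]
        have hkxz := hx' z hz
        constructor
        · rintro ⟨hne, hc⟩
          refine ⟨?_, hc⟩
          rintro (h1 | ⟨y, hy, hd⟩)
          · exact hne (Or.inl (by omega))
          · rcases List.mem_cons.1 hy with rfl | hy'
            · exact hne (Or.inl (by omega))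
            · exact hne (Or.inr ⟨y, hy', hd⟩)
        · rintro ⟨hne, hc⟩
          refine ⟨?_, hc⟩
          rintro (h1 | ⟨y, hy, hd⟩)
          · -- z1 < x1 : then z0 < x0 (tie impossible), so x dominates z
            rcases hkxz with h | h
            · exact hne (Or.inr ⟨x, List.mem_cons_self .., by omega⟩)
            · omega
          · exact hne (Or.inr ⟨y, List.mem_cons_of_mem _ hy, hd⟩)
      rw [hcong]
      have hpx : ((!(decide (x.getD 1 0 < ths) || eliminatedB (x :: r) x)) &&
          decide (total < x.getD 0 0 + x.getD 1 0)) =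
          decide (total < x.getD 0 0 + x.getD 1 0) := by
        rw [pred_eq_decide, decide_eq_decide]
        constructor
        · exact fun h => h.2
        · refine fun h => ⟨?_, h⟩
          rintro (h1 | h2)
          · omega
          · exact hEx h2
      rw [hpx]
      by_cases hc : total < x.getD 0 0 + x.getD 1 0 <;> simp [hc] <;> omega
    · simp only [countF, if_neg hk]
      rw [ih ths h0 hr]
      have hpx : ((!(decide (x.getD 1 0 < ths) || eliminatedB (x :: r) x)) &&
          decide (total < x.getD 0 0 + x.getD 1 0)) = false := by
        have h1 : decide (x.getD 1 0 < ths) = true := decide_eq_true (by omega)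
        rw [h1, Bool.true_or, Bool.not_true, Bool.false_and]
      rw [hpx]
      have hcong : r.countP (fun z => (!(decide (z.getD 1 0 < ths) || eliminatedB r z)) &&
            decide (total < z.getD 0 0 + z.getD 1 0)) =
          r.countP (fun z => (!(decide (z.getD 1 0 < ths) || eliminatedB (x :: r) z)) &&
            decide (total < z.getD 0 0 + z.getD 1 0)) := by
        apply List.countP_congr
        intro z hz
        rw [pred_eq_decide, pred_eq_decide, decide_eq_true_iff, decide_eq_true_iff]
        have hkxz := hx' z hz
        constructor
        · rintro ⟨hne, hc⟩
          refine ⟨?_, hc⟩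
          rintro (h1 | ⟨y, hy, hd⟩)
          · exact hne (Or.inl h1)
          · rcases List.mem_cons.1 hy with rfl | hy'
            · exact hne (Or.inl (by omega))
            · exact hne (Or.inr ⟨y, hy', hd⟩)
        · rintro ⟨hne, hc⟩
          refine ⟨?_, hc⟩
          rintro (h1 | ⟨y, hy, hd⟩)
          · exact hne (Or.inl h1)
          · exact hne (Or.inr ⟨y, List.mem_cons_of_mem _ hy, hd⟩)
      rw [hcong]
      simp

-- beats is exactly the strict-dominance test on the first two entries (getD form).
lemma beats_iff (y x : List Int) :
    beats y x = true ↔ (x.getD 0 0 < y.getD 0 0 ∧ x.getD 1 0 < y.getD 1 0) := by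
  have h : ∀ z : List Int, z.headD 0 = z.getD 0 0 ∧ z.tail.headD 0 = z.getD 1 0 := by
    intro z
    rcases z with _ | ⟨a, _ | ⟨b, t⟩⟩ <;> exact ⟨rfl, rfl⟩
  rw [beats, (h y).1, (h y).2, (h x).1, (h x).2, decide_eq_true_iff]

lemma not_beats_of (y x : List Int) (h : (!beats y x) = true) :
    ¬(x.getD 0 0 < y.getD 0 0 ∧ x.getD 1 0 < y.getD 1 0) := by
  rw [Bool.not_eq_true', ← Bool.not_eq_true, beats_iff] at h
  exact h

-- Both counts, assembled: A's result when the pivot has no strict dominator.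
lemma solution_eq_count (scores : List (List Int))
    (h : eliminatedB (PySem.List.sorted scores sortKey) (scores.headD []) = false) :
    solution scores = 1 + ((PySem.List.sorted scores sortKey).countP
      (fun z => (!(decide (z.getD 1 0 < 0) || eliminatedB (PySem.List.sorted scores sortKey) z)) &&
        decide ((scores.headD []).sum < z.getD 0 0 + z.getD 1 0)) : Int) := by
  have hclean : ∀ y ∈ PySem.List.sorted scores sortKey,
      ¬((scores.headD []).getD 0 0 < y.getD 0 0 ∧ (scores.headD []).getD 1 0 < y.getD 1 0) := by
    intro y hy hd
    rw [elimB_eq_decide, decide_eq_false_iff_not] at h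
    exact h ⟨y, hy, hd⟩
  rw [solution]
  rw [loop_clean _ _ _ _ _ _ hclean,
    countF_eq _ _ 0 le_rfl (PySem.List.sorted_pairwise scores sortKey)]

lemma alt_eq_count (scores : List (List Int))
    (h : eliminatedB (PySem.List.sorted scores sortKey) (scores.headD []) = false) :
    solution_alt scores = 1 + ((PySem.List.sorted scores sortKey).countP
      (fun z => (!eliminatedB (PySem.List.sorted scores sortKey) z) &&
        decide ((scores.headD []).sum < z.getD 0 0 + z.getD 1 0)) : Int) := by
  rw [solution_alt]
  simp only [h, Bool.false_eq_true, if_false, List.countP_eq_length_filter]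

-- ===== VERDICT (by name: the statement is the Claim_ definition above) =====
theorem solution_spec : Claim_unchanged_solution := by
  intro scores _ _ hnD
  cases h : eliminatedB (PySem.List.sorted scores sortKey) (scores.headD []) with
  | true =>
    rw [elimB_eq_decide, decide_eq_true_iff] at h
    rw [solution, solution_alt]
    simp only [elimB_eq_decide, decide_eq_true h, if_true]
    exact loop_dominated _ _ _ _ _ _ h
  | false =>
    rw [solution_eq_count scores h, alt_eq_count scores h]
    congr 1
    norm_cast
    apply List.countP_congr
    intro z hz
    rw [pred_eq_decide, decide_eq_true_iff]
    have hzB : (!eliminatedB (PySem.List.sorted scores sortKey) z &&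
        decide ((scores.headD []).sum < z.getD 0 0 + z.getD 1 0)) = true ↔
        (¬ ∃ y ∈ PySem.List.sorted scores sortKey,
          z.getD 0 0 < y.getD 0 0 ∧ z.getD 1 0 < y.getD 1 0) ∧
        (scores.headD []).sum < z.getD 0 0 + z.getD 1 0 := by
      rw [elimB_eq_decide]; simp
    rw [hzB]
    constructor
    · rintro ⟨hne, hc⟩
      exact ⟨fun hE => hne (Or.inr hE), hc⟩
    · rintro ⟨hE, hc⟩
      refine ⟨?_, hc⟩
      rintro (hneg | hEx)
      · -- a silently-skipped negative-second undominated winner would put us inside D_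
        apply hnD
        rw [elimB_eq_decide, decide_eq_false_iff_not] at h
        cases scores with
        | nil => simp at hz
        | cons p t =>
          have hz' := (PySem.List.mem_sorted _ _ _ _).1 hz
          have hp2 : ∀ w : List Int, w.headD 0 = w.getD 0 0 ∧ w.tail.headD 0 = w.getD 1 0 := by
            intro w
            rcases w with _ | ⟨a, _ | ⟨b, r⟩⟩ <;> exact ⟨rfl, rfl⟩
          refine ⟨z, hz', by rw [(hp2 z).2]; exact hneg,
            by rw [(hp2 z).1, (hp2 z).2]; exact hc, ?_⟩
          intro y hy
          have hyS := (PySem.List.mem_sorted (p :: t) sortKey false y).2 hy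
          rw [Bool.not_eq_true', Bool.or_eq_false_iff]
          constructor
          · rw [← Bool.not_eq_true, beats_iff]
            exact fun hd => hE ⟨y, hyS, hd⟩
          · rw [← Bool.not_eq_true, beats_iff]
            exact fun hd => h ⟨y, hyS, hd⟩
      · exact hE hEx

theorem solution_changed : Claim_changed_solution := by
  unfold Claim_changed_solution; decide

theorem solution_tight : Claim_exact_solution := by
  intro scores _ _ hD
  cases scores with
  | nil => exact absurd hD (by simp [D_solution])
  | cons p t =>
    obtain ⟨x, hxmem, hxneg, hxtot, hall⟩ := hD
    have hp2 : ∀ w : List Int, w.headD 0 = w.getD 0 0 ∧ w.tail.headD 0 = w.getD 1 0 := by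
      intro w
      rcases w with _ | ⟨a, _ | ⟨b, r⟩⟩ <;> exact ⟨rfl, rfl⟩
    rw [(hp2 x).2] at hxneg
    rw [(hp2 x).1, (hp2 x).2] at hxtot
    have hgx : ∀ y ∈ p :: t, ¬(x.getD 0 0 < y.getD 0 0 ∧ x.getD 1 0 < y.getD 1 0) := by
      intro y hy
      exact not_beats_of y x (by have := hall y hy; simp only [Bool.not_or, Bool.and_eq_true] at this; simp [this.1])
    have hgp : ∀ y ∈ p :: t, ¬(((p :: t : List (List Int)).headD []).getD 0 0 < y.getD 0 0 ∧
        ((p :: t : List (List Int)).headD []).getD 1 0 < y.getD 1 0) := by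
      intro y hy
      exact not_beats_of y p (by have := hall y hy; simp only [Bool.not_or, Bool.and_eq_true] at this; simp [this.2])
    have h : eliminatedB (PySem.List.sorted (p :: t) sortKey) ((p :: t : List (List Int)).headD []) = false := by
      rw [elimB_eq_decide, decide_eq_false_iff_not]
      rintro ⟨y, hy, hd⟩
      exact hgp y ((PySem.List.mem_sorted _ _ _ _).1 hy) hd
    rw [solution_eq_count _ h, alt_eq_count _ h]
    have hlt : (PySem.List.sorted (p :: t) sortKey).countP
        (fun z => (!(decide (z.getD 1 0 < 0) || eliminatedB (PySem.List.sorted (p :: t) sortKey) z)) &&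
          decide (((p :: t : List (List Int)).headD []).sum < z.getD 0 0 + z.getD 1 0)) <
        (PySem.List.sorted (p :: t) sortKey).countP
        (fun z => (!eliminatedB (PySem.List.sorted (p :: t) sortKey) z) &&
          decide (((p :: t : List (List Int)).headD []).sum < z.getD 0 0 + z.getD 1 0)) := by
      refine countP_lt ?_ x ((PySem.List.mem_sorted _ _ _ _).2 hxmem) ?_ ?_
      · intro a _ ha
        simp only [Bool.and_eq_true, Bool.not_eq_true', Bool.or_eq_false_iff] at ha ⊢
        exact ⟨ha.1.2, ha.2⟩
      · rw [Bool.and_eq_true]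
        refine ⟨?_, decide_eq_true hxtot⟩
        simp only [Bool.not_eq_true']
        rw [elimB_eq_decide, decide_eq_false_iff_not]
        rintro ⟨y, hy, hd⟩
        exact hgx y ((PySem.List.mem_sorted _ _ _ _).1 hy) hd
      · rw [Bool.and_eq_false_iff]
        refine Or.inl ?_
        simp only [Bool.not_eq_false', Bool.or_eq_true_iff]
        exact Or.inl (decide_eq_true hxneg)
    omega
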